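-- pv_equiv track=rewrite | github.com/AdamZhouSE/pythonHomework | Code/CodeRecords/2199/60775/296225.py | find
-- ===== SOURCE A (Python) =====
-- def isdubble(str1,sub):
--     length = len(sub)
--     times = 0
--     for start in range(0,len(str1)-length+1):
--         if start >= len(str1):
--             return False
--         if str1[start:start+length] == sub:
--             times += 1
--             if times == 2:
--                 return True
--     return False
--
-- def find(string):
--     result = 1
--     if len(string) == 1:
--         return result
--     for length in range(1,len(string)+1):
--         for start in range(0,len(string) - length+1):
--             sub = string[start:start+length]
--             if isdubble(string,sub):
--                 result = max(result,find(sub)+1)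
--     return result
-- ===== SOURCE B (Python) =====
-- def find(string):
--     # Bottom-up DP over the distinct substrings, shortest first, memoised in a
--     # dict; each substring's depth is 1 + max depth of a substring repeated in it.
--     n = len(string)
--     depth = {}
--     for L in range(1, n + 1):
--         for i in range(n - L + 1):
--             s = string[i:i + L]
--             if s in depth:
--                 continue
--             best = 1
--             for l2 in range(1, L):
--                 for j in range(L - l2 + 1):
--                     t = s[j:j + l2]
--                     f1 = s.find(t)
--                     if f1 != -1 and s.find(t, f1 + 1) != -1:
--                         best = max(best, depth[t] + 1)
--             depth[s] = best
--     return depth.get(string, 1)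
-- ===== Notes on version B (the rewrite author's own statement) =====
-- stated objective: alternative
-- what changed: Replaces A's unmemoised recursion over substrings by a bottom-up dynamic program: distinct substrings are processed shortest-first with their depths stored in a dict, and the repetition test uses two str.find calls instead of A's slice-scanning helper.
import Mathlib
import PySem

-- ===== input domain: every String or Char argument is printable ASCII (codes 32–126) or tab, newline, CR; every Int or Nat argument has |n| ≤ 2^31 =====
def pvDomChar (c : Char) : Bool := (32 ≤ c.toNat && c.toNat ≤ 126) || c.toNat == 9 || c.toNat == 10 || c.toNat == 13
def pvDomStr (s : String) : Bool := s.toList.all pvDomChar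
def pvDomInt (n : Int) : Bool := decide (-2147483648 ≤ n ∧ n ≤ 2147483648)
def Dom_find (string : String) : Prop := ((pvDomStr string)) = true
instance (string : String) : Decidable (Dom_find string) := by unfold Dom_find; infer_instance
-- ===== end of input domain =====

-- B replaces A's unmemoised recursion by a bottom-up dynamic program over the distinct
-- substrings (shortest first, depths stored in a dict), testing repetition with two
-- str.find calls; same return value on every input.

-- ===== PORT A =====
-- str1[start:start+length] for 0 ≤ start, 0 ≤ length (exact: Python slice with in-range
-- nonnegative bounds is drop/take)
def pvSub (s : List Char) (start length : Nat) : List Char := (s.drop start).take length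

-- the 'for start in range(...)' loop of isdubble, with its early returns and the 'times' counter
def isdGo (str1 sub : List Char) (length : Nat) : List Nat → Nat → Bool
  | [], _ => false
  | start :: rest, times =>
    if str1.length ≤ start then false
    else if pvSub str1 start length == sub then
      (if times + 1 == 2 then true else isdGo str1 sub length rest (times + 1))
    else isdGo str1 sub length rest times

def isdubbleL (str1 sub : List Char) : Bool :=
  isdGo str1 sub sub.length (List.range (((str1.length : Int) - sub.length + 1).toNat)) 0

-- find, with a fuel parameter for the recursion; fuel = len(string) always suffices
-- (each recursive call is on a strictly shorter string: findFuel_stable below)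
def findFuel : Nat → List Char → Int
  | 0, _ => 1
  | f + 1, s =>
    if s.length == 1 then 1
    else
      ((List.range s.length).map (· + 1)).foldl (fun result L =>
        (List.range (s.length - L + 1)).foldl (fun result start =>
          if isdubbleL s (pvSub s start L) then max result (findFuel f (pvSub s start L) + 1)
          else result) result) 1

def find (string : String) : Int := findFuel string.toList.length string.toList

-- ===== PORT B =====
-- the repetition test of Source B: f1 = s.find(t); f1 != -1 and s.find(t, f1+1) != -1
def twoOcc (s t : List Char) : Bool :=
  (PySem.Chars.find s t != -1) &&
    (PySem.Chars.findFrom s t (PySem.Chars.find s t + 1) none != -1)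

def findAltL (str : List Char) : Int :=
  let n := str.length
  let depth :=
    ((List.range n).map (· + 1)).foldl (fun d L =>
      (List.range (n - L + 1)).foldl (fun d i =>
        if d.contains (pvSub str i L) then d
        else
          d.insert (pvSub str i L)
            (((List.range (L - 1)).map (· + 1)).foldl (fun best l2 =>
              (List.range (L - l2 + 1)).foldl (fun best j =>
                if twoOcc (pvSub str i L) (pvSub (pvSub str i L) j l2) then
                  -- depth[t]: the key is always present (proved below); getD is exact here
                  max best (d.getD (pvSub (pvSub str i L) j l2) 0 + 1)
                else best) best) 1)) d)
      (PySem.Dict.empty (κ := List Char) (ν := Int))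
  depth.getD str 1

def find_alt (string : String) : Int := findAltL string.toList

-- ===== PRECONDITION & SPEC =====
def Spec_find (string : String) (out : Int) : Prop := out = find_alt string
instance (string : String) (out : Int) : Decidable (Spec_find string out) := by unfold Spec_find; infer_instance

-- ===== CLAIM (what is proved, stated in full; the proofs are below) =====
def Claim_equal_find : Prop := ∀ (string : String), Dom_find string → Spec_find string (find string)

-- ===== LEMMAS AND PROOFS =====

lemma findFuel_nil (f : Nat) : findFuel f [] = 1 := by
  cases f <;> simp [findFuel]

lemma isdGo_true_ge (s t : List Char) (L : Nat) :
    ∀ (starts : List Nat) (times : Nat), isdGo s t L starts times = true →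
      2 ≤ times + starts.length := by
  intro starts
  induction starts with
  | nil => intro times h; simp [isdGo] at h
  | cons p rest ih =>
    intro times h
    simp only [isdGo] at h
    by_cases hlen : s.length ≤ p
    · rw [if_pos hlen] at h; simp at h
    · rw [if_neg hlen] at h
      by_cases hm : (pvSub s p L == t) = true
      · rw [if_pos hm] at h
        by_cases h2 : (times + 1 == 2) = true
        · simp only [beq_iff_eq] at h2; simp only [List.length_cons]; omega
        · rw [if_neg h2] at h
          have := ih (times + 1) h; simp only [List.length_cons]; omega
      · rw [if_neg hm] at h
        have := ih times h; simp only [List.length_cons]; omega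

lemma isdubble_length_lt {s t : List Char} (h : isdubbleL s t = true) :
    t.length < s.length := by
  unfold isdubbleL at h
  have h2 := isdGo_true_ge s t t.length _ 0 h
  simp only [Nat.zero_add, List.length_range] at h2
  omega

lemma findFuel_stable : ∀ (n : Nat) (s : List Char), s.length ≤ n →
    ∀ f g, s.length ≤ f → s.length ≤ g → findFuel f s = findFuel g s := by
  intro n
  induction n with
  | zero =>
    intro s hs f g _ _
    have hnil : s = [] := List.eq_nil_of_length_eq_zero (by omega)
    subst hnil; simp [findFuel_nil]
  | succ n ih =>
    intro s hs f g hf hg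
    cases f with
    | zero =>
      have hnil : s = [] := List.eq_nil_of_length_eq_zero (by omega)
      subst hnil; simp [findFuel_nil]
    | succ f' =>
      cases g with
      | zero =>
        have hnil : s = [] := List.eq_nil_of_length_eq_zero (by omega)
        subst hnil; simp [findFuel_nil]
      | succ g' =>
        simp only [findFuel]
        by_cases hone : s.length = 1
        · simp [hone]
        · rw [if_neg (by simp [hone]), if_neg (by simp [hone])]
          apply PySem.List.foldl_congr_mem
          intro acc L _
          apply PySem.List.foldl_congr_mem
          intro acc' start _
          by_cases hd : isdubbleL s (pvSub s start L) = true
          · have hlt := isdubble_length_lt hd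
            simp only [hd, if_true]
            rw [ih (pvSub s start L) (by omega) f' g' (by omega) (by omega)]
          · simp [hd]

-- the value A computes, as a function of the string alone
def F (s : List Char) : Int := findFuel s.length s

lemma F_eq (s : List Char) : F s =
    if s.length == 1 then (1 : Int)
    else ((List.range s.length).map (· + 1)).foldl (fun result L =>
        (List.range (s.length - L + 1)).foldl (fun result start =>
          if isdubbleL s (pvSub s start L) then max result (F (pvSub s start L) + 1)
          else result) result) 1 := by
  by_cases h0 : s = []
  · subst h0; simp [F, findFuel_nil]
  · obtain ⟨m, hs⟩ : ∃ m, s.length = m + 1 :=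
      ⟨s.length - 1, by have := List.length_pos_iff.mpr h0; omega⟩
    have hF : F s = findFuel (m + 1) s := by unfold F; rw [hs]
    rw [hF]
    simp only [findFuel]
    by_cases hone : (s.length == 1) = true
    · rw [if_pos hone, if_pos hone]
    · rw [if_neg hone, if_neg hone]
      apply PySem.List.foldl_congr_mem
      intro acc L _
      apply PySem.List.foldl_congr_mem
      intro acc' start _
      by_cases hd : isdubbleL s (pvSub s start L) = true
      · have hlt := isdubble_length_lt hd
        simp only [hd, if_true]
        rw [show findFuel m (pvSub s start L) = F (pvSub s start L) from
          findFuel_stable (pvSub s start L).length _ le_rfl m _ (by omega) le_rfl]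
      · simp [hd]

-- "t occurs at two distinct positions"
def PvTwo (s t : List Char) : Prop := ∃ p q, p < q ∧ t <+: s.drop p ∧ t <+: s.drop q

lemma infix_iff_prefix_drop (u t : List Char) : t <:+: u ↔ ∃ j, t <+: u.drop j := by
  rw [← PySem.Chars.isIn_iff_infix, ← PySem.Chars.exists_prefix_drop_iff_isIn]

lemma prefix_drop_bound {s t : List Char} {p : Nat} (ht : t ≠ []) (h : t <+: s.drop p) :
    p + t.length ≤ s.length := by
  have h1 := h.length_le
  have h2 : 1 ≤ t.length := List.length_pos_iff.mpr ht
  simp only [List.length_drop] at h1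
  omega

lemma take_of_prefix {t u : List Char} (h : t <+: u) : u.take t.length = t := by
  obtain ⟨r, hr⟩ := h
  rw [← hr, List.take_left]

lemma isdGo_count (s t : List Char) :
    ∀ (starts : List Nat) (times : Nat), times ≤ 1 → (∀ p ∈ starts, p < s.length) →
      (isdGo s t t.length starts times = true ↔
        2 ≤ times + (starts.filter (fun p => pvSub s p t.length == t)).length) := by
  intro starts
  induction starts with
  | nil => intro times ht _; simp [isdGo]; omega
  | cons p rest ih =>
    intro times ht hmem
    have hp : p < s.length := hmem p (by simp)
    simp only [isdGo, List.filter_cons]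
    rw [if_neg (by omega : ¬ s.length ≤ p)]
    by_cases hm : (pvSub s p t.length == t) = true
    · rw [if_pos hm, if_pos hm]
      by_cases h2 : times + 1 = 2
      · rw [if_pos (by simpa using h2)]
        simp only [List.length_cons]
        constructor
        · intro _; omega
        · intro _; trivial
      · rw [if_neg (by simpa using h2)]
        rw [ih (times + 1) (by omega) (fun q hq => hmem q (List.mem_cons_of_mem _ hq))]
        simp only [List.length_cons]
        omega
    · rw [if_neg hm, if_neg hm]
      exact ih times ht (fun q hq => hmem q (List.mem_cons_of_mem _ hq))

lemma two_le_length_of_two_mem {l : List Nat} {a b : Nat}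
    (ha : a ∈ l) (hb : b ∈ l) (hab : a ≠ b) : 2 ≤ l.length := by
  match l with
  | [] => simp at ha
  | [x] => simp at ha hb; exact absurd (ha.trans hb.symm) hab
  | x :: y :: l => simp [List.length_cons]

lemma exists_two_mem_of_nodup {l : List Nat} (hn : l.Nodup) (h2 : 2 ≤ l.length) :
    ∃ a ∈ l, ∃ b ∈ l, a ≠ b := by
  match l with
  | [] => simp at h2
  | [x] => simp at h2
  | x :: y :: l =>
    refine ⟨x, by simp, y, by simp, ?_⟩
    intro h
    exact (List.nodup_cons.mp hn).1 (by simp [h])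

lemma A_iff_two (s t : List Char) (ht : t ≠ []) : isdubbleL s t = true ↔ PvTwo s t := by
  unfold isdubbleL
  have ht1 : 1 ≤ t.length := List.length_pos_iff.mpr ht
  have hmem : ∀ p ∈ List.range (((s.length : Int) - t.length + 1).toNat), p < s.length := by
    intro p hp; simp only [List.mem_range] at hp; omega
  rw [isdGo_count s t _ 0 (by omega) hmem]
  simp only [Nat.zero_add]
  constructor
  · intro h
    have hnd : ((List.range (((s.length : Int) - t.length + 1).toNat)).filter
        (fun p => pvSub s p t.length == t)).Nodup := (List.nodup_range).filter _
    obtain ⟨a, haf, b, hbf, hab⟩ := exists_two_mem_of_nodup hnd h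
    have hpa : t <+: s.drop a := by
      have h' := (List.mem_filter.mp haf).2
      rw [beq_iff_eq] at h'
      rw [← h']; exact List.take_prefix _ _
    have hpb : t <+: s.drop b := by
      have h' := (List.mem_filter.mp hbf).2
      rw [beq_iff_eq] at h'
      rw [← h']; exact List.take_prefix _ _
    rcases Nat.lt_or_ge a b with hlt | hge
    · exact ⟨a, b, hlt, hpa, hpb⟩
    · exact ⟨b, a, by omega, hpb, hpa⟩
  · rintro ⟨p, q, hpq, hp, hq⟩
    have hbp := prefix_drop_bound ht hp
    have hbq := prefix_drop_bound ht hq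
    have hmp : p ∈ (List.range (((s.length : Int) - t.length + 1).toNat)).filter
        (fun p => pvSub s p t.length == t) := by
      refine List.mem_filter.mpr ⟨List.mem_range.mpr (by omega), ?_⟩
      rw [beq_iff_eq]; exact take_of_prefix hp
    have hmq : q ∈ (List.range (((s.length : Int) - t.length + 1).toNat)).filter
        (fun p => pvSub s p t.length == t) := by
      refine List.mem_filter.mpr ⟨List.mem_range.mpr (by omega), ?_⟩
      rw [beq_iff_eq]; exact take_of_prefix hq
    exact two_le_length_of_two_mem hmp hmq (by omega)

lemma twoOcc_iff (s t : List Char) (ht : t ≠ []) : twoOcc s t = true ↔ PvTwo s t := by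
  unfold twoOcc
  have ht1 : 1 ≤ t.length := List.length_pos_iff.mpr ht
  simp only [Bool.and_eq_true, bne_iff_ne, ne_eq]
  constructor
  · rintro ⟨h1, h2⟩
    have h0 : 0 ≤ PySem.Chars.find s t := by
      have := PySem.Chars.neg_one_le_find (s := s) (sub := t); omega
    obtain ⟨hpre, -⟩ := PySem.Chars.find_spec (s := s) (sub := t) h0
    have hlt : (PySem.Chars.find s t).toNat + t.length ≤ s.length :=
      prefix_drop_bound ht hpre
    have hcast : PySem.Chars.find s t + 1 = (((PySem.Chars.find s t).toNat + 1 : Nat) : Int) := by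
      omega
    rw [hcast] at h2
    have hiff := PySem.Chars.findFrom_natCast_eq_neg_one_iff s t
      ((PySem.Chars.find s t).toNat + 1) (by omega)
    have hinf : t <:+: s.drop ((PySem.Chars.find s t).toNat + 1) := by
      by_contra hc; exact h2 (hiff.mpr hc)
    obtain ⟨j, hj⟩ := (infix_iff_prefix_drop _ t).mp hinf
    rw [List.drop_drop] at hj
    exact ⟨(PySem.Chars.find s t).toNat, (PySem.Chars.find s t).toNat + 1 + j,
      by omega, hpre, hj⟩
  · rintro ⟨p, q, hpq, hp, hq⟩
    have hinfs : t <:+: s := (infix_iff_prefix_drop s t).mpr ⟨p, hp⟩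
    have h1 : PySem.Chars.find s t ≠ -1 := by
      rw [PySem.Chars.find_ne_neg_one_iff]; exact hinfs
    have h0 : 0 ≤ PySem.Chars.find s t := by
      have := PySem.Chars.neg_one_le_find (s := s) (sub := t); omega
    obtain ⟨hpre, hmin⟩ := PySem.Chars.find_spec (s := s) (sub := t) h0
    have hple : (PySem.Chars.find s t).toNat ≤ p := by
      by_contra hc
      exact hmin p (by omega) hp
    have hlt : (PySem.Chars.find s t).toNat + t.length ≤ s.length :=
      prefix_drop_bound ht hpre
    refine ⟨h1, ?_⟩
    have hcast : PySem.Chars.find s t + 1 = (((PySem.Chars.find s t).toNat + 1 : Nat) : Int) := by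
      omega
    rw [hcast,
      PySem.Chars.findFrom_natCast_eq_neg_one_iff s t ((PySem.Chars.find s t).toNat + 1) (by omega)]
    intro hc
    apply hc
    refine (infix_iff_prefix_drop _ t).mpr ⟨q - ((PySem.Chars.find s t).toNat + 1), ?_⟩
    rw [List.drop_drop]
    have hqq : (PySem.Chars.find s t).toNat + 1 + (q - ((PySem.Chars.find s t).toNat + 1)) = q := by
      omega
    rw [hqq]
    exact hq

-- ----- the dictionary invariant -----

def GoodD (d : PySem.Dict (List Char) Int) : Prop := ∀ k v, d.get? k = some v → v = F k

def CovD (str : List Char) (d : PySem.Dict (List Char) Int) (m : Nat) : Prop :=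
  ∀ k, k <:+: str → k ≠ [] → k.length ≤ m → (d.get? k).isSome = true

lemma pvSub_infix (s : List Char) (i L : Nat) : pvSub s i L <:+: s :=
  ⟨s.take i, (s.drop i).drop L, by simp [pvSub]⟩

lemma pvSub_length (s : List Char) (i L : Nat) (h : i + L ≤ s.length) :
    (pvSub s i L).length = L := by
  simp only [pvSub, List.length_take, List.length_drop]
  omega

-- the body of B's loop over start positions i (for a fixed substring length L)
def bStep (str : List Char) (L : Nat) (d : PySem.Dict (List Char) Int) (i : Nat) :
    PySem.Dict (List Char) Int :=
  if d.contains (pvSub str i L) then d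
  else
    d.insert (pvSub str i L)
      (((List.range (L - 1)).map (· + 1)).foldl (fun best l2 =>
        (List.range (L - l2 + 1)).foldl (fun best j =>
          if twoOcc (pvSub str i L) (pvSub (pvSub str i L) j l2) then
            max best (d.getD (pvSub (pvSub str i L) j l2) 0 + 1)
          else best) best) 1)

lemma findAltL_eq (str : List Char) : findAltL str =
    (((List.range str.length).map (· + 1)).foldl (fun d L =>
      (List.range (str.length - L + 1)).foldl (bStep str L) d)
      (PySem.Dict.empty (κ := List Char) (ν := Int))).getD str 1 := rfl

-- B's inner 'best' loop computes exactly A's value F s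
lemma best_eq_F (str s : List Char) (d : PySem.Dict (List Char) Int) (L : Nat)
    (hs : s <:+: str) (hlen : s.length = L) (hL : 1 ≤ L)
    (hg : GoodD d) (hc : CovD str d (L - 1)) :
    ((List.range (L - 1)).map (· + 1)).foldl (fun best l2 =>
      (List.range (L - l2 + 1)).foldl (fun best j =>
        if twoOcc s (pvSub s j l2) then max best (d.getD (pvSub s j l2) 0 + 1)
        else best) best) 1 = F s := by
  rw [F_eq]
  by_cases h1 : L = 1
  · subst h1
    rw [if_pos (by simp [hlen])]
    simp
  · rw [if_neg (by simp [hlen]; omega)]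
    simp only [hlen]
    have hr : List.range L = List.range (L - 1) ++ [L - 1] := by
      conv_lhs => rw [show L = (L - 1) + 1 by omega]
      rw [List.range_succ]
    rw [hr, List.map_append, List.foldl_append]
    -- the last iteration (length L, the whole string) contributes nothing
    have hlast : ∀ acc : Int,
        (List.map (· + 1) [L - 1]).foldl (fun result L' =>
          (List.range (L - L' + 1)).foldl (fun result start =>
            if isdubbleL s (pvSub s start L') then max result (F (pvSub s start L') + 1)
            else result) result) acc = acc := by
      intro acc
      simp only [List.map_cons, List.map_nil, List.foldl_cons, List.foldl_nil,
        show L - 1 + 1 = L by omega]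
      simp only [Nat.sub_self, Nat.zero_add, List.range_one, List.foldl_cons, List.foldl_nil]
      have hself : pvSub s 0 L = s := by
        simp only [pvSub, List.drop_zero, ← hlen, List.take_length]
      rw [hself]
      cases hb : isdubbleL s s with
      | false => rfl
      | true => exact absurd (isdubble_length_lt hb) (lt_irrefl _)
    rw [hlast]
    apply PySem.List.foldl_congr_mem
    intro acc l2 hl2
    obtain ⟨x, hx, hxe⟩ := List.mem_map.mp hl2
    rw [List.mem_range] at hx
    apply PySem.List.foldl_congr_mem
    intro acc' j hj
    rw [List.mem_range] at hj
    have hjl : j + l2 ≤ L := by omega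
    have htl : (pvSub s j l2).length = l2 := pvSub_length s j l2 (by omega)
    have htne : pvSub s j l2 ≠ [] := by
      intro hh; rw [hh] at htl; simp at htl; omega
    have hcond : twoOcc s (pvSub s j l2) = isdubbleL s (pvSub s j l2) := by
      cases h1 : twoOcc s (pvSub s j l2) with
      | true =>
        exact ((A_iff_two s _ htne).mpr ((twoOcc_iff s _ htne).mp h1)).symm
      | false =>
        cases h2 : isdubbleL s (pvSub s j l2) with
        | false => rfl
        | true =>
          rw [(twoOcc_iff s _ htne).mpr ((A_iff_two s _ htne).mp h2)] at h1
          exact h1.symm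
    rw [hcond]
    cases hb : isdubbleL s (pvSub s j l2) with
    | false => simp
    | true =>
      have hinfstr : pvSub s j l2 <:+: str := (pvSub_infix s j l2).trans hs
      have hsome := hc (pvSub s j l2) hinfstr htne (by omega)
      obtain ⟨v, hv⟩ := Option.isSome_iff_exists.mp hsome
      have hvF : v = F (pvSub s j l2) := hg _ _ hv
      rw [PySem.Dict.getD_eq_get?_getD, hv, hvF, Option.getD_some]

lemma isSome_bStep (str : List Char) (L : Nat) (d : PySem.Dict (List Char) Int)
    (i : Nat) (k : List Char) (h : (d.get? k).isSome = true) :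
    ((bStep str L d i).get? k).isSome = true := by
  unfold bStep
  split
  · exact h
  · rw [PySem.Dict.get?_insert]
    split
    · simp
    · exact h

lemma inner_loop (str : List Char) (L : Nat) (hL : 1 ≤ L) (_hLn : L ≤ str.length) :
    ∀ (idxs : List Nat) (d : PySem.Dict (List Char) Int),
      (∀ i ∈ idxs, i + L ≤ str.length) → GoodD d → CovD str d (L - 1) →
      GoodD (idxs.foldl (bStep str L) d) ∧
      (∀ k, (d.get? k).isSome = true →
        ((idxs.foldl (bStep str L) d).get? k).isSome = true) ∧
      (∀ i ∈ idxs, (((idxs.foldl (bStep str L) d).get? (pvSub str i L))).isSome = true) := by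
  intro idxs
  induction idxs with
  | nil =>
    intro d _ hg _
    exact ⟨hg, fun _ h => h, by simp⟩
  | cons i rest ih =>
    intro d hmem hg hc
    simp only [List.foldl_cons]
    have hiL : i + L ≤ str.length := hmem i (by simp)
    have hprops : GoodD (bStep str L d i) ∧
        ((bStep str L d i).get? (pvSub str i L)).isSome = true := by
      unfold bStep
      by_cases hct : d.contains (pvSub str i L) = true
      · rw [if_pos hct]
        refine ⟨hg, ?_⟩
        rw [← PySem.Dict.contains_eq_isSome_get?]
        exact hct
      · rw [if_neg hct]
        have hbest := best_eq_F str (pvSub str i L) d L ((pvSub_infix str i L))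
          (pvSub_length str i L hiL) hL hg hc
        constructor
        · intro k v hv
          rw [PySem.Dict.get?_insert] at hv
          split at hv
          · rename_i hk
            rw [hk]
            rw [← hbest]
            exact (Option.some_inj.mp hv).symm
          · exact hg k v hv
        · rw [PySem.Dict.get?_insert, if_pos rfl]; simp
    have hmono : ∀ k, (d.get? k).isSome = true →
        ((bStep str L d i).get? k).isSome = true := fun k h => isSome_bStep str L d i k h
    have hc1 : CovD str (bStep str L d i) (L - 1) :=
      fun k h1 h2 h3 => hmono k (hc k h1 h2 h3)
    obtain ⟨g2, m2, c2⟩ := ih (bStep str L d i)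
      (fun j hj => hmem j (List.mem_cons_of_mem _ hj)) hprops.1 hc1
    refine ⟨g2, fun k h => m2 k (hmono k h), ?_⟩
    intro j hj
    rcases List.mem_cons.mp hj with hj | hj
    · rw [hj]; exact m2 _ hprops.2
    · exact c2 j hj

lemma outer_loop (str : List Char) : ∀ n', n' ≤ str.length →
    GoodD (((List.range n').map (· + 1)).foldl (fun d L =>
      (List.range (str.length - L + 1)).foldl (bStep str L) d)
      (PySem.Dict.empty (κ := List Char) (ν := Int))) ∧
    CovD str (((List.range n').map (· + 1)).foldl (fun d L =>
      (List.range (str.length - L + 1)).foldl (bStep str L) d)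
      (PySem.Dict.empty (κ := List Char) (ν := Int))) n' := by
  intro n'
  induction n' with
  | zero =>
    intro _
    simp only [List.range_zero, List.map_nil, List.foldl_nil]
    constructor
    · intro k v hv; rw [PySem.Dict.get?_empty] at hv; exact absurd hv (by simp)
    · intro k _ hk hlen
      have : 1 ≤ k.length := List.length_pos_iff.mpr hk
      omega
  | succ n' ih =>
    intro hn
    obtain ⟨hg, hc⟩ := ih (by omega)
    rw [List.range_succ, List.map_append, List.foldl_append]
    simp only [List.map_cons, List.map_nil, List.foldl_cons, List.foldl_nil]
    have hL : 1 ≤ n' + 1 := by omega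
    obtain ⟨g2, m2, c2⟩ := inner_loop str (n' + 1) hL hn
      (List.range (str.length - (n' + 1) + 1)) _
      (by intro i hi; rw [List.mem_range] at hi; omega) hg (by simpa using hc)
    refine ⟨g2, ?_⟩
    intro k hinf hkne hklen
    rcases Nat.lt_or_ge k.length (n' + 1) with hsmall | hbig
    · exact m2 k (hc k hinf hkne (by omega))
    · have hkL : k.length = n' + 1 := by omega
      obtain ⟨u, w, hw⟩ := hinf
      have hdrop : str.drop u.length = k ++ w := by
        rw [← hw, List.append_assoc, List.drop_left]
      have hsub : pvSub str u.length (n' + 1) = k := by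
        unfold pvSub
        rw [hdrop, ← hkL, List.take_left]
      have hlenstr : u.length + (n' + 1) ≤ str.length := by
        have : str.length = u.length + (k.length + w.length) := by
          rw [← hw]; simp [List.length_append]
        omega
      have := c2 u.length (List.mem_range.mpr (by omega))
      rw [hsub] at this
      exact this

lemma findAltL_eq_F (str : List Char) : findAltL str = F str := by
  rw [findAltL_eq]
  by_cases hnil : str = []
  · subst hnil
    simp [PySem.Dict.getD_empty, F, findFuel_nil]
  · obtain ⟨hg, hc⟩ := outer_loop str str.length le_rfl
    have hsome := hc str (List.infix_refl str) hnil le_rfl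
    obtain ⟨v, hv⟩ := Option.isSome_iff_exists.mp hsome
    rw [PySem.Dict.getD_eq_get?_getD, hv, Option.getD_some]
    exact hg str v hv

-- ===== VERDICT (by name: the statement is the Claim_ definition above) =====
theorem find_spec : Claim_equal_find := by
  intro string _
  show find string = find_alt string
  unfold find find_alt
  rw [findAltL_eq_F]
  rfl
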